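-- pv_equiv track=rewrite | github.com/lucaest/mastersthesis | backtesting_methods.py | hit_durations
-- ===== SOURCE A (Python) =====
-- def hit_durations(violations):
--     duration = []
--     count = 1
--     for i in violations:
--         if i == 0:
--             count += 1
--         elif i == 1:
--             duration.append(count)
--             count = 1
--
--     return duration
-- ===== SOURCE B (Python) =====
-- def hit_durations(violations):
--     relevant = [x for x in violations if x == 0 or x == 1]
--     ones = []
--     for i, x in enumerate(relevant):
--         if x == 1:
--             ones.append(i)
--     durations = []
--     prev = -1
--     for idx in ones:
--         durations.append(idx - prev)
--         prev = idx
--     return durations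
-- ===== Notes on version B (the rewrite author's own statement) =====
-- stated objective: alternative
-- what changed: B first filters to the relevant 0/1 elements, collects the indices of the 1s, and emits consecutive index differences (prev initialised to -1) instead of carrying a running gap counter through one loop.
import Mathlib
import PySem

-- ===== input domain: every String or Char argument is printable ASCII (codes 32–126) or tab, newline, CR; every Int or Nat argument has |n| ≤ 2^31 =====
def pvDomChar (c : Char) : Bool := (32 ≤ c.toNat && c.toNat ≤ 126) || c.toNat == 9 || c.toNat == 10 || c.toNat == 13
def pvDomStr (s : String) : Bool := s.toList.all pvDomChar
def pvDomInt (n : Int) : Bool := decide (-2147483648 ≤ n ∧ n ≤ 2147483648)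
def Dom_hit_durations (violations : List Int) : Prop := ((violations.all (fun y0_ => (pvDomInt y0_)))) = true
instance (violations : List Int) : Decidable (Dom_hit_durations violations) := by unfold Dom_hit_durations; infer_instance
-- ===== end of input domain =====

-- B: filter to the 0/1 elements, take the indices of the 1s, output consecutive index differences (prev = -1).

-- ===== PORT A =====
def hit_durations (violations : List Int) : List Int :=
  (violations.foldl
    (fun (st : List Int × Int) i =>
      if i = 0 then (st.1, st.2 + 1)
      else if i = 1 then (st.1 ++ [st.2], 1)
      else st)
    ([], 1)).1

-- ===== PORT B =====
def hit_durations_alt (violations : List Int) : List Int :=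
  let relevant := violations.filter (fun x => x == 0 || x == 1)
  let ones := (relevant.foldl
    (fun (st : List Int × Int) x =>
      if x = 1 then (st.1 ++ [st.2], st.2 + 1) else (st.1, st.2 + 1))
    ([], 0)).1
  (ones.foldl
    (fun (st : List Int × Int) idx => (st.1 ++ [idx - st.2], idx))
    ([], -1)).1

-- ===== PRECONDITION & SPEC =====
def Spec_hit_durations (violations : List Int) (out : List Int) : Prop := out = hit_durations_alt violations
instance (violations : List Int) (out : List Int) : Decidable (Spec_hit_durations violations out) := by unfold Spec_hit_durations; infer_instance

-- ===== CLAIM (what is proved, stated in full; the proofs are below) =====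
def Claim_equal_hit_durations : Prop := ∀ (violations : List Int), Dom_hit_durations violations → Spec_hit_durations violations (hit_durations violations)

-- ===== LEMMAS AND PROOFS =====

/-- A's loop as a structural recursion (no accumulator). -/
def recA : List Int → Int → List Int
  | [], _ => []
  | x :: xs, c => if x = 0 then recA xs (c + 1) else if x = 1 then c :: recA xs 1 else recA xs c

/-- Indices (within the list) of the elements equal to 1. -/
def onesR : List Int → List Int
  | [] => []
  | x :: xs => if x = 1 then 0 :: (onesR xs).map (· + 1) else (onesR xs).map (· + 1)

/-- Consecutive differences against a previous value. -/
def walkR : List Int → Int → List Int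
  | [], _ => []
  | d :: ds, p => (d - p) :: walkR ds d

theorem foldA (xs : List Int) (dur : List Int) (c : Int) :
    (xs.foldl
      (fun (st : List Int × Int) i =>
        if i = 0 then (st.1, st.2 + 1)
        else if i = 1 then (st.1 ++ [st.2], 1)
        else st)
      (dur, c)).1 = dur ++ recA xs c := by
  induction xs generalizing dur c with
  | nil => simp [recA]
  | cons x xs ih =>
    by_cases h0 : x = 0
    · simp [h0, recA, ih]
    · by_cases h1 : x = 1
      · simp [h1, recA, ih]
      · simp [h0, h1, recA, ih]

theorem foldOnes (xs : List Int) (acc : List Int) (i : Int) :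
    (xs.foldl
      (fun (st : List Int × Int) x =>
        if x = 1 then (st.1 ++ [st.2], st.2 + 1) else (st.1, st.2 + 1))
      (acc, i)).1 = acc ++ (onesR xs).map (· + i) := by
  induction xs generalizing acc i with
  | nil => simp [onesR]
  | cons x xs ih =>
    by_cases h1 : x = 1
    · subst h1
      rw [List.foldl_cons, if_pos rfl, ih]
      simp [onesR]
      intro a _
      ring
    · rw [List.foldl_cons, if_neg h1, ih]
      simp [onesR, h1]
      intro a _
      ring

theorem foldWalk (ds : List Int) (acc : List Int) (p : Int) :
    (ds.foldl
      (fun (st : List Int × Int) idx => (st.1 ++ [idx - st.2], idx))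
      (acc, p)).1 = acc ++ walkR ds p := by
  induction ds generalizing acc p with
  | nil => simp [walkR]
  | cons d ds ih => simp [walkR, ih]

theorem walk_shift (ds : List Int) (p : Int) :
    walkR (ds.map (· + 1)) p = walkR ds (p - 1) := by
  induction ds generalizing p with
  | nil => simp [walkR]
  | cons d ds ih =>
    simp only [List.map_cons, walkR, ih]
    have h1 : d + 1 - p = d - (p - 1) := by ring
    have h2 : d + 1 - 1 = d := by ring
    rw [h1, h2]

theorem recA_filter (xs : List Int) (c : Int) :
    recA xs c = recA (xs.filter (fun x => x == 0 || x == 1)) c := by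
  induction xs generalizing c with
  | nil => simp
  | cons x xs ih =>
    by_cases h0 : x = 0
    · simp [h0, recA, ih]
    · by_cases h1 : x = 1
      · simp [h1, recA, ih]
      · simp [h0, h1, recA, ih]

theorem recA_walk (r : List Int) (c : Int) (h : ∀ x ∈ r, x = 0 ∨ x = 1) :
    recA r c = walkR (onesR r) (-c) := by
  induction r generalizing c with
  | nil => simp [recA, onesR, walkR]
  | cons x xs ih =>
    have hx := h x (List.mem_cons_self)
    have hxs : ∀ y ∈ xs, y = 0 ∨ y = 1 := fun y hy => h y (List.mem_cons_of_mem _ hy)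
    rcases hx with h0 | h1
    · have e : -(c + 1) = -c - 1 := by ring
      simp [h0, recA, onesR, ih _ hxs, walk_shift, e]
    · subst h1
      simp [recA, onesR, walkR, walk_shift, ih _ hxs]

-- ===== VERDICT (by name: the statement is the Claim_ definition above) =====
theorem hit_durations_spec : Claim_equal_hit_durations := by
  intro violations _
  unfold Spec_hit_durations hit_durations hit_durations_alt
  simp only [foldA, foldOnes, foldWalk, List.nil_append]
  simp only [add_zero, List.map_id']
  rw [recA_filter]
  rw [recA_walk _ _ (fun x hx => by simpa using List.of_mem_filter hx)]
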